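-- pv_equiv track=rewrite | github.com/Cohunefatuniformness570/english-words-knowledge-graph | src/viz/render_frames.py | timeline_totals
-- ===== SOURCE A (Python) =====
-- def timeline_totals(timeline: dict[int, dict[str, int]]) -> tuple[dict[int, int], dict[int, int]]:
--     totals: dict[int, int] = {}
--     new_words: dict[int, int] = {}
--     previous_prefix_counts: dict[str, int] = {}
--     for year in sorted(timeline.keys()):
--         counts = timeline[year]
--         totals[year] = sum(counts.values())
--         yearly_new = 0
--         for prefix, count in counts.items():
--             prev = previous_prefix_counts.get(prefix, 0)
--             if count > prev:
--                 yearly_new += count - prev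
--             previous_prefix_counts[prefix] = count
--         new_words[year] = yearly_new
--     return totals, new_words
-- ===== SOURCE B (Python) =====
-- def timeline_totals(timeline: dict[int, dict[str, int]]) -> tuple[dict[int, int], dict[int, int]]:
--     years = sorted(timeline)
--     totals = {y: sum(timeline[y].values()) for y in years}
--
--     def prev_count(i: int, prefix: str) -> int:
--         for y in reversed(years[:i]):
--             counts = timeline[y]
--             if prefix in counts:
--                 return counts[prefix]
--         return 0
--
--     new_words = {
--         y: sum(max(0, c - prev_count(i, p)) for p, c in timeline[y].items())
--         for i, y in enumerate(years)
--     }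
--     return totals, new_words
-- ===== Notes on version B (the rewrite author's own statement) =====
-- stated objective: alternative
-- what changed: B replaces A's single forward pass with a running previous-prefix-counts dict by two independent dict comprehensions: totals directly per year, and new-word counts computed per year by re-deriving each prefix's previous count with a backward scan over the earlier sorted years, so no mutable cross-year state is carried.
import Mathlib
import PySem

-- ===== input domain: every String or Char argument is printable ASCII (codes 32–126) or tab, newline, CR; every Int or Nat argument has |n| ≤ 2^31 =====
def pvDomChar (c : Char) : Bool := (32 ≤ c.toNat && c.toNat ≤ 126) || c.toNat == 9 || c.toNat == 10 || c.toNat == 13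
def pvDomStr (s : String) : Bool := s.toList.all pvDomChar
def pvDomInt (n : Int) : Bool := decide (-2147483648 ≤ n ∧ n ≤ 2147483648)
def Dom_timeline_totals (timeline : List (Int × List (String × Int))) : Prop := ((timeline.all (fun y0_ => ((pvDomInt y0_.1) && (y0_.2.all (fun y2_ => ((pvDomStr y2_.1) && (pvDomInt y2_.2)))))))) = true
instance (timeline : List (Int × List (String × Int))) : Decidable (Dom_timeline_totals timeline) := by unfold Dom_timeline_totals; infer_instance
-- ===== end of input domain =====

-- B recomputes each prefix's previous count by a backward scan over earlier sorted years
-- (two independent dict comprehensions) instead of A's carried previous-counts dict: an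
-- alternative, state-free decomposition of the same exact computation.


-- ===== PORT A =====
-- inner loop over counts.items(): state = (yearly_new, previous_prefix_counts)
def pvInnerStep (st : Int × PySem.Dict String Int) (pc : String × Int) : Int × PySem.Dict String Int :=
  let prev := st.2.getD pc.1 0
  (if pc.2 > prev then st.1 + (pc.2 - prev) else st.1, st.2.insert pc.1 pc.2)

-- body of A's loop over sorted years: state = (totals, new_words, previous_prefix_counts)
def pvAStep (tl : PySem.Dict Int (List (String × Int)))
    (st : PySem.Dict Int Int × PySem.Dict Int Int × PySem.Dict String Int) (year : Int) :
    PySem.Dict Int Int × PySem.Dict Int Int × PySem.Dict String Int :=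
  let counts := PySem.Dict.mk (tl.getD year [])
  let totals := st.1.insert year counts.values.sum
  let r := counts.items.foldl pvInnerStep (0, st.2.2)
  (totals, st.2.1.insert year r.1, r.2)

def timeline_totals (timeline : List (Int × List (String × Int))) : (List (Int × Int)) × (List (Int × Int)) :=
  let tl := PySem.Dict.mk timeline
  let r := (PySem.List.sorted tl.keys (fun y => y) false).foldl (pvAStep tl)
      (PySem.Dict.empty, PySem.Dict.empty, PySem.Dict.empty)
  (r.1.items, r.2.1.items)

-- ===== PORT B =====
-- prev_count's backward loop 'for y in reversed(years[:i])' with its early return,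
-- ported as structural recursion on the reversed slice (exact: same visit order, same result)
def pvPrevScan (tl : PySem.Dict Int (List (String × Int))) (p : String) : List Int → Int
  | [] => 0
  | y :: rest =>
    let counts := PySem.Dict.mk (tl.getD y [])
    if counts.contains p then counts.getD p 0 else pvPrevScan tl p rest

def timeline_totals_alt (timeline : List (Int × List (String × Int))) : (List (Int × Int)) × (List (Int × Int)) :=
  let tl := PySem.Dict.mk timeline
  let years := PySem.List.sorted tl.keys (fun y => y) false
  let totals := years.foldl (fun d y => d.insert y (PySem.Dict.mk (tl.getD y [])).values.sum) PySem.Dict.empty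
  let new_words := (PySem.List.enumerate years).foldl (fun d iy =>
      d.insert iy.2 (((PySem.Dict.mk (tl.getD iy.2 [])).items.map (fun pc =>
        max 0 (pc.2 - pvPrevScan tl pc.1 (PySem.List.slice years none (some iy.1)).reverse))).sum))
    PySem.Dict.empty
  (totals.items, new_words.items)

-- ===== PRECONDITION & SPEC =====
-- Pre_ excludes association lists with a duplicate year key or a duplicate prefix key inside a
-- year, which do not faithfully encode the Python dict arguments (dict() collapses duplicates,
-- so any behaviour of the list encoding there is accidental). The outer-key conjunct is needed
-- only for the encoding's faithfulness; the proof uses the inner one.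
def Pre_timeline_totals (timeline : List (Int × List (String × Int))) : Prop :=
  (timeline.map Prod.fst).Nodup ∧ ∀ p ∈ timeline, (p.2.map Prod.fst).Nodup
instance (timeline : List (Int × List (String × Int))) : Decidable (Pre_timeline_totals timeline) := by
  unfold Pre_timeline_totals; infer_instance
def pvWitness_timeline_totals : (List (Int × List (String × Int))) :=
  [(2000, [("ab", 3)]), (2001, [("ab", 5), ("cd", 1)])]
def Spec_timeline_totals (timeline : List (Int × List (String × Int))) (out : (List (Int × Int)) × (List (Int × Int))) : Prop := out = timeline_totals_alt timeline
instance (timeline : List (Int × List (String × Int))) (out : (List (Int × Int)) × (List (Int × Int))) : Decidable (Spec_timeline_totals timeline out) := by unfold Spec_timeline_totals; infer_instance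

-- ===== CLAIM (what is proved, stated in full; the proofs are below) =====
def Claim_equal_timeline_totals : Prop := ∀ (timeline : List (Int × List (String × Int))), Dom_timeline_totals timeline → Pre_timeline_totals timeline → Spec_timeline_totals timeline (timeline_totals timeline)

-- ===== LEMMAS AND PROOFS =====

-- proof-side vocabulary
def pvIns (D : PySem.Dict String Int) (l : List (String × Int)) : PySem.Dict String Int :=
  l.foldl (fun D pc => D.insert pc.1 pc.2) D

def pvPrevFold (tl : PySem.Dict Int (List (String × Int))) (zs : List Int) (D : PySem.Dict String Int) : PySem.Dict String Int :=
  zs.foldl (fun D y => pvIns D (tl.getD y [])) D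

-- backward scan with an explicit fallback value
def pvScanD (tl : PySem.Dict Int (List (String × Int))) (p : String) : List Int → Int → Int
  | [], d => d
  | y :: rest, d =>
    if (PySem.Dict.mk (tl.getD y [])).contains p then (PySem.Dict.mk (tl.getD y [])).getD p 0
    else pvScanD tl p rest d

def pvBval (tl : PySem.Dict Int (List (String × Int))) (prev : List Int) (y : Int) : Int :=
  ((tl.getD y []).map (fun pc => max 0 (pc.2 - pvPrevScan tl pc.1 prev.reverse))).sum

def pvTotFold (tl : PySem.Dict Int (List (String × Int))) (zs : List Int) (t : PySem.Dict Int Int) : PySem.Dict Int Int :=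
  zs.foldl (fun d y => d.insert y (PySem.Dict.mk (tl.getD y [])).values.sum) t

def pvNwFold (tl : PySem.Dict Int (List (String × Int))) : List Int → List Int → PySem.Dict Int Int → PySem.Dict Int Int
  | [], _, n => n
  | y :: rest, prev, n => pvNwFold tl rest (prev ++ [y]) (n.insert y (pvBval tl prev y))

theorem pvPrevScan_eq_scanD (tl : PySem.Dict Int (List (String × Int))) (p : String) (l : List Int) :
    pvPrevScan tl p l = pvScanD tl p l 0 := by
  induction l with
  | nil => rfl
  | cons y rest ih => simp [pvPrevScan, pvScanD, ih]

theorem pvScanD_append (tl : PySem.Dict Int (List (String × Int))) (p : String) (l : List Int) (y : Int) (d : Int) :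
    pvScanD tl p (l ++ [y]) d =
      pvScanD tl p l (if (PySem.Dict.mk (tl.getD y [])).contains p then (PySem.Dict.mk (tl.getD y [])).getD p 0 else d) := by
  induction l with
  | nil => simp [pvScanD]
  | cons z rest ih => simp [pvScanD, ih]

theorem pvIns_getD (l : List (String × Int)) (D : PySem.Dict String Int) (p : String)
    (h : (l.map Prod.fst).Nodup) :
    (pvIns D l).getD p 0 =
      if (PySem.Dict.mk l).contains p then (PySem.Dict.mk l).getD p 0 else D.getD p 0 := by
  induction l generalizing D with
  | nil => simp [pvIns, PySem.Dict.contains]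
  | cons pc rest ih =>
    obtain ⟨k, v⟩ := pc
    simp only [List.map_cons, List.nodup_cons] at h
    simp only [pvIns, List.foldl_cons]
    rw [show (rest.foldl (fun D pc => D.insert pc.1 pc.2) (D.insert k v)) = pvIns (D.insert k v) rest from rfl]
    by_cases hp : p = k
    · have hnm : ¬ (PySem.Dict.mk rest).contains k := by
        rw [PySem.Dict.contains_iff_mem_keys]
        simpa [PySem.Dict.keys] using h.1
      subst hp
      rw [ih _ h.2]
      simp only [hnm, PySem.Dict.getD_insert_self]
      simp [PySem.Dict.getD_eq_get?_getD, PySem.Dict.get?_mk_cons]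
    · rw [ih _ h.2, PySem.Dict.getD_insert_of_ne _ _ _ hp]
      have hc : (PySem.Dict.mk ((k, v) :: rest)).contains p = (PySem.Dict.mk rest).contains p := by
        rw [PySem.Dict.contains_eq_isSome_get?, PySem.Dict.contains_eq_isSome_get?,
            PySem.Dict.get?_mk_cons]
        simp [show ¬ (k == p) from by simpa using fun hh => hp hh.symm]
      rw [hc]
      by_cases hcc : (PySem.Dict.mk rest).contains p
      · simp only [hcc, if_true]
        rw [PySem.Dict.getD_eq_get?_getD, PySem.Dict.getD_eq_get?_getD, PySem.Dict.get?_mk_cons]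
        simp [show ¬ (k == p) from by simpa using fun hh => hp hh.symm]
      · simp [hcc]

theorem pvPrevFold_getD (tl : PySem.Dict Int (List (String × Int)))
    (H : ∀ y, ((tl.getD y []).map Prod.fst).Nodup) (p : String) (zs : List Int)
    (D : PySem.Dict String Int) :
    (pvPrevFold tl zs D).getD p 0 = pvScanD tl p zs.reverse (D.getD p 0) := by
  induction zs generalizing D with
  | nil => rfl
  | cons y rest ih =>
    simp only [pvPrevFold, List.foldl_cons, List.reverse_cons]
    rw [show (rest.foldl (fun D y => pvIns D (tl.getD y [])) (pvIns D (tl.getD y []))) = pvPrevFold tl rest (pvIns D (tl.getD y [])) from rfl,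
        ih, pvIns_getD _ _ _ (H y), pvScanD_append]

theorem pvInner_eq (l : List (String × Int)) (D : PySem.Dict String Int) (a : Int)
    (h : (l.map Prod.fst).Nodup) :
    l.foldl pvInnerStep (a, D) =
      (a + (l.map (fun pc => max 0 (pc.2 - D.getD pc.1 0))).sum, pvIns D l) := by
  induction l generalizing a D with
  | nil => simp [pvIns]
  | cons pc rest ih =>
    simp only [List.map_cons, List.nodup_cons] at h
    simp only [List.foldl_cons, pvInnerStep]
    rw [ih _ _ h.2]
    have hsum : (rest.map (fun qc => max 0 (qc.2 - (D.insert pc.1 pc.2).getD qc.1 0))).sum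
        = (rest.map (fun qc => max 0 (qc.2 - D.getD qc.1 0))).sum := by
      congr 1
      apply List.map_congr_left
      intro qc hq
      rw [PySem.Dict.getD_insert_of_ne]
      intro hh
      exact h.1 (hh ▸ List.mem_map_of_mem hq)
    rw [hsum]
    have h1 : (if pc.2 > D.getD pc.1 0 then a + (pc.2 - D.getD pc.1 0) else a)
        = a + max 0 (pc.2 - D.getD pc.1 0) := by split_ifs <;> omega
    rw [h1]
    simp [pvIns, add_assoc]

theorem pvMain (tl : PySem.Dict Int (List (String × Int)))
    (H : ∀ y, ((tl.getD y []).map Prod.fst).Nodup) (zs : List Int) :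
    ∀ (prev : List Int) (t n : PySem.Dict Int Int),
    zs.foldl (pvAStep tl) (t, n, pvPrevFold tl prev PySem.Dict.empty) =
      (pvTotFold tl zs t, pvNwFold tl zs prev n, pvPrevFold tl (prev ++ zs) PySem.Dict.empty) := by
  induction zs with
  | nil => intro prev t n; simp [pvTotFold, pvNwFold, pvPrevFold]
  | cons y rest ih =>
    intro prev t n
    simp only [List.foldl_cons]
    have hstep : pvAStep tl (t, n, pvPrevFold tl prev PySem.Dict.empty) y =
        (t.insert y (PySem.Dict.mk (tl.getD y [])).values.sum,
         n.insert y (pvBval tl prev y),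
         pvPrevFold tl (prev ++ [y]) PySem.Dict.empty) := by
      simp only [pvAStep]
      rw [pvInner_eq _ _ _ (H y)]
      have hb : (0 : Int) + ((tl.getD y []).map (fun pc => max 0 (pc.2 - (pvPrevFold tl prev PySem.Dict.empty).getD pc.1 0))).sum = pvBval tl prev y := by
        rw [zero_add, pvBval]
        congr 1
        apply List.map_congr_left
        intro pc _
        rw [pvPrevFold_getD tl H, pvPrevScan_eq_scanD, PySem.Dict.getD_empty]
      have hp : pvIns (pvPrevFold tl prev PySem.Dict.empty) (tl.getD y []) = pvPrevFold tl (prev ++ [y]) PySem.Dict.empty := by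
        simp [pvPrevFold, List.foldl_append]
      rw [hb, hp]
    rw [hstep, ih (prev ++ [y])]
    simp [pvTotFold, pvNwFold, List.append_assoc]

theorem pvBside (tl : PySem.Dict Int (List (String × Int))) (years : List Int) :
    ∀ (zs pre : List Int) (n : PySem.Dict Int Int), years = pre ++ zs →
    (PySem.List.enumerate zs (pre.length : Int)).foldl (fun d iy =>
        d.insert iy.2 (((PySem.Dict.mk (tl.getD iy.2 [])).items.map (fun pc =>
          max 0 (pc.2 - pvPrevScan tl pc.1 (PySem.List.slice years none (some iy.1)).reverse))).sum)) n
      = pvNwFold tl zs pre n := by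
  intro zs
  induction zs with
  | nil => intro pre n _; simp [PySem.List.enumerate_nil, pvNwFold]
  | cons y rest ih =>
    intro pre n hy
    rw [PySem.List.enumerate_cons]
    simp only [List.foldl_cons]
    have hslice : PySem.List.slice years none (some (pre.length : Int)) = pre := by
      rw [PySem.List.slice_to_natCast, hy, List.take_left]
    have hlen : ((pre.length : Int) + 1) = (((pre ++ [y]).length : Nat) : Int) := by
      simp
    rw [hslice, hlen, ih (pre ++ [y]) _ (by simp [hy])]
    rfl

theorem pvNodupInner (timeline : List (Int × List (String × Int)))
    (h : ∀ p ∈ timeline, (p.2.map Prod.fst).Nodup) (y : Int) :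
    (((PySem.Dict.mk timeline).getD y []).map Prod.fst).Nodup := by
  rw [PySem.Dict.getD_eq_get?_getD]
  cases hg : (PySem.Dict.mk timeline).get? y with
  | none => simp
  | some v =>
    have hm : (y, v) ∈ (PySem.Dict.mk timeline).items :=
      PySem.Dict.mem_items_of_get?_eq_some _ hg
    simpa using h (y, v) hm

-- ===== VERDICT (by name: the statement is the Claim_ definition above) =====
theorem timeline_totals_spec : Claim_equal_timeline_totals := by
  intro timeline _ hpre
  have H := pvNodupInner timeline hpre.2
  have hA := pvMain (PySem.Dict.mk timeline) H
      (PySem.List.sorted (PySem.Dict.mk timeline).keys (fun y => y) false) [] PySem.Dict.empty PySem.Dict.empty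
  have hB := pvBside (PySem.Dict.mk timeline)
      (PySem.List.sorted (PySem.Dict.mk timeline).keys (fun y => y) false)
      (PySem.List.sorted (PySem.Dict.mk timeline).keys (fun y => y) false) [] PySem.Dict.empty rfl
  simp only [List.nil_append] at hA
  simp only [List.length_nil, Int.natCast_zero] at hB
  rw [show pvPrevFold (PySem.Dict.mk timeline) [] PySem.Dict.empty = PySem.Dict.empty from rfl] at hA
  simp only [Spec_timeline_totals, timeline_totals, timeline_totals_alt, hA, hB, pvTotFold]
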